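-- pv_equiv track=rewrite | github.com/SRKALAN/policy_search_APIs-master | utils.py | distance_group
-- ===== SOURCE A (Python) =====
-- def distance_group(index_list,distance=2):
--     index_list.sort()
--
--     group_index=[[index_list[0]]]
--     for i in index_list[1:]:
--
--         if abs(i-group_index[-1][-1])<=distance:
--
--             group_index[-1].append(i)
--         else:
--             group_index.append([i])
--     return group_index
-- ===== SOURCE B (Python) =====
-- def distance_group(index_list, distance=2):
--     index_list.sort()
--     s = index_list
--     n = len(s)
--     if n == 0:
--         return []
--     cuts = [k for k in range(1, n) if s[k] - s[k - 1] > distance]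
--     bounds = [0] + cuts + [n]
--     return [s[a:b] for a, b in zip(bounds, bounds[1:])]
-- ===== Notes on version B (the rewrite author's own statement) =====
-- stated objective: alternative
-- what changed: Instead of sweeping and mutating the last nested group, B computes the cut positions (adjacent gaps greater than distance) with one comprehension and emits each group as a slice between consecutive boundaries; Pre_ excludes only the empty list, on which A raises IndexError while B returns an empty result.
import Mathlib
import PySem

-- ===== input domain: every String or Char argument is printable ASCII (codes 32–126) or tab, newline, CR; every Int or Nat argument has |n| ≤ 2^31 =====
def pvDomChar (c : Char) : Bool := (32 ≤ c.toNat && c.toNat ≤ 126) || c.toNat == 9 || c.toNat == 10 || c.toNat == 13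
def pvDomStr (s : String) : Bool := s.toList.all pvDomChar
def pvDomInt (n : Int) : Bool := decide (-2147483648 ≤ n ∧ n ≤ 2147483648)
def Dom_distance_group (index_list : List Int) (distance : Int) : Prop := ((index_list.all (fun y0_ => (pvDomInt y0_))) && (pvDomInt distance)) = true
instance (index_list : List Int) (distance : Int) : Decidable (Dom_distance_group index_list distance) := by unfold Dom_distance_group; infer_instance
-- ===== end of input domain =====

-- B computes cut positions from adjacent gaps and emits groups as slices, instead of A's
-- sweep that mutates the last nested group; both sort the argument in place (same mutation).


-- ===== PORT A =====
-- one loop step: compare i with group_index[-1][-1]; append to the last group or start a new one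
def aStep (distance : Int) (acc : List (List Int)) (i : Int) : List (List Int) :=
  match PySem.List.pyGet? acc (-1) with
  | none => acc      -- unreachable: group_index is never empty
  | some g =>
    match PySem.List.pyGet? g (-1) with
    | none => acc    -- unreachable: every group is nonempty
    | some last =>
      if |i - last| ≤ distance then acc.dropLast ++ [g ++ [i]]
      else acc ++ [[i]]

def distance_group (index_list : List Int) (distance : Int) : List (List Int) :=
  let s := PySem.List.sorted index_list (fun x => x) false
  match s with
  | [] => []         -- Python raises IndexError reading the first element; excluded by Pre_
  | x :: rest => rest.foldl (aStep distance) [[x]]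

-- ===== PORT B =====
def distance_group_alt (index_list : List Int) (distance : Int) : List (List Int) :=
  let s := PySem.List.sorted index_list (fun x => x) false
  let n : Int := s.length
  if n = 0 then []
  else
    let cuts := (PySem.List.pyRange 1 n 1).filter
      (fun k => decide (PySem.List.pyGetD s k 0 - PySem.List.pyGetD s (k - 1) 0 > distance))
    let bounds := 0 :: (cuts ++ [n])
    (bounds.zip bounds.tail).map (fun p => PySem.List.slice s (some p.1) (some p.2))

-- ===== PRECONDITION & SPEC =====
-- Pre_ excludes only the empty list, on which A raises IndexError reading the first element.
def Pre_distance_group (index_list : List Int) (distance : Int) : Prop := index_list ≠ []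
instance (index_list : List Int) (distance : Int) : Decidable (Pre_distance_group index_list distance) := by unfold Pre_distance_group; infer_instance
def pvWitness_distance_group : List Int × Int := ([1, 2, 5], 2)

def Spec_distance_group (index_list : List Int) (distance : Int) (out : List (List Int)) : Prop := out = distance_group_alt index_list distance
instance (index_list : List Int) (distance : Int) (out : List (List Int)) : Decidable (Spec_distance_group index_list distance out) := by unfold Spec_distance_group; infer_instance

-- ===== CLAIM (what is proved, stated in full; the proofs are below) =====
def Claim_equal_distance_group : Prop := ∀ (index_list : List Int) (distance : Int), Dom_distance_group index_list distance → Pre_distance_group index_list distance → Spec_distance_group index_list distance (distance_group index_list distance)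

-- ===== LEMMAS AND PROOFS =====


def cutsB (d : Int) (s : List Int) : List Int :=
  (PySem.List.pyRange 1 (s.length : Int) 1).filter
    (fun k => decide (PySem.List.pyGetD s k 0 - PySem.List.pyGetD s (k - 1) 0 > d))

def cutsN (d : Int) (s : List Int) : List Nat :=
  (List.range (s.length - 1)).filter (fun k => decide (s.getD (k + 1) 0 - s.getD k 0 > d))

lemma cutsB_eq (d : Int) (s : List Int) :
    cutsB d s = (cutsN d s).map (fun k : Nat => (k : Int) + 1) := by
  unfold cutsB cutsN
  rw [PySem.List.pyRange_one]
  have h1 : ((s.length : Int) - 1).toNat = s.length - 1 := by omega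
  rw [h1, List.filter_map]
  have hpred : ∀ k ∈ List.range (s.length - 1),
      ((fun k => decide (PySem.List.pyGetD s k 0 - PySem.List.pyGetD s (k - 1) 0 > d)) ∘
        (fun k : Nat => (1 : Int) + k)) k
      = decide (s.getD (k + 1) 0 - s.getD k 0 > d) := by
    intro k _
    simp only [Function.comp_apply]
    rw [show (1 : Int) + (k : Int) = ((k + 1 : Nat) : Int) by push_cast; ring]
    rw [show ((k + 1 : Nat) : Int) - 1 = ((k : Nat) : Int) by push_cast; ring]
    rw [PySem.List.pyGetD_natCast, PySem.List.pyGetD_natCast]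
  rw [List.filter_congr hpred]
  have hf : (fun k : Nat => (1 : Int) + k) = (fun k : Nat => (k : Int) + 1) := by
    funext k; ring
  rw [hf]

lemma cutsN_cons (d x y : Int) (t : List Int) :
    cutsN d (x :: y :: t) = (if y - x > d then [0] else []) ++ (cutsN d (y :: t)).map (· + 1) := by
  unfold cutsN
  simp only [List.length_cons]
  rw [show t.length + 1 + 1 - 1 = t.length + 1 by omega, show t.length + 1 - 1 = t.length by omega]
  rw [List.range_succ_eq_map, List.filter_cons, List.filter_map]
  have hpred : ∀ k ∈ List.range t.length,
      ((fun k => decide ((x :: y :: t).getD (k + 1) 0 - (x :: y :: t).getD k 0 > d)) ∘ Nat.succ) k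
      = decide ((y :: t).getD (k + 1) 0 - (y :: t).getD k 0 > d) := by
    intro k _
    simp [Function.comp]
  rw [List.filter_congr hpred]
  have hsucc : (List.filter (fun k => decide ((y :: t).getD (k+1) 0 - (y :: t).getD k 0 > d)) (List.range t.length)).map Nat.succ
      = (List.filter (fun k => decide ((y :: t).getD (k+1) 0 - (y :: t).getD k 0 > d)) (List.range t.length)).map (· + 1) := by
    apply List.map_congr_left; intro k _; omega
  rw [hsucc]
  by_cases hgt : y - x > d
  · simp [hgt]
  · simp [hgt]

lemma slice_succ (x a b : Int) (xs : List Int) (ha : 0 ≤ a) (hb : 0 ≤ b) :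
    PySem.List.slice (x :: xs) (some (a + 1)) (some (b + 1)) = PySem.List.slice xs (some a) (some b) := by
  rw [PySem.List.slice_toNat _ (by omega) (by omega), PySem.List.slice_toNat _ ha hb]
  rw [show (a + 1).toNat = a.toNat + 1 by omega, show (b + 1).toNat = b.toNat + 1 by omega]
  simp [List.drop_succ_cons]

lemma slice_zero_succ (x b : Int) (xs : List Int) (hb : 0 ≤ b) :
    PySem.List.slice (x :: xs) (some 0) (some (b + 1)) = x :: PySem.List.slice xs (some 0) (some b) := by
  rw [PySem.List.slice_toNat _ (by omega) (by omega), PySem.List.slice_toNat _ (by omega) hb]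
  rw [show (b + 1).toNat = b.toNat + 1 by omega]
  simp

lemma zipslice_shift (x : Int) (xs L : List Int) (hL : ∀ a ∈ L, 0 ≤ a) :
    ((L.map (· + 1)).zip (L.map (· + 1)).tail).map
        (fun p => PySem.List.slice (x :: xs) (some p.1) (some p.2))
      = (L.zip L.tail).map (fun p => PySem.List.slice xs (some p.1) (some p.2)) := by
  rw [show (L.map (· + 1)).tail = L.tail.map (· + 1) from (List.map_tail ..).symm]
  rw [List.zip_map]
  rw [List.map_map]
  apply List.map_congr_left
  intro p hp
  obtain ⟨h1, h2⟩ := List.of_mem_zip hp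
  have := hL p.1 h1
  have := hL p.2 (List.mem_of_mem_tail h2)
  simp only [Function.comp, Prod.map]
  exact slice_succ x p.1 p.2 xs ‹0 ≤ p.1› ‹0 ≤ p.2›

def consume (d : Int) (g : List Int) (p : Int) : List Int → List (List Int)
  | [] => [g]
  | i :: xs => if |i - p| ≤ d then consume d (g ++ [i]) i xs else g :: consume d [i] i xs

def bcore (d : Int) (s : List Int) : List (List Int) :=
  ((0 :: (cutsB d s ++ [(s.length : Int)])).zip (cutsB d s ++ [(s.length : Int)])).map
    (fun p => PySem.List.slice s (some p.1) (some p.2))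

lemma mem_cutsB_nonneg (d : Int) (s : List Int) : ∀ a ∈ cutsB d s, 0 ≤ a := by
  rw [cutsB_eq]
  intro a ha
  obtain ⟨k, _, rfl⟩ := List.mem_map.mp ha
  positivity

lemma consume_append (d : Int) : ∀ (xs a g : List Int) (p : Int),
    consume d (a ++ g) p xs = (a ++ (consume d g p xs).headI) :: (consume d g p xs).tail := by
  intro xs
  induction xs with
  | nil => intro a g p; simp [consume]
  | cons i xs ih =>
    intro a g p
    by_cases hc : |i - p| ≤ d
    · simp only [consume, if_pos hc, List.append_assoc]
      exact ih a (g ++ [i]) i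
    · simp [consume, if_neg hc]

lemma bcore_eq_consume (d : Int) : ∀ (xs : List Int) (x : Int), (x :: xs).Pairwise (· ≤ ·) →
    bcore d (x :: xs) = consume d [x] x xs := by
  intro xs
  induction xs with
  | nil =>
    intro x _
    have hc : cutsB d [x] = [] := by rw [cutsB_eq]; simp [cutsN]
    simp only [bcore, hc, List.length_cons, List.length_nil, List.nil_append,
      List.zip_cons_cons, List.zip_nil_right, List.map_cons, List.map_nil]
    rw [PySem.List.slice_toNat _ (by norm_num) (by positivity)]
    simp [consume]
  | cons y t ih =>
    intro x hp
    have hxy : x ≤ y := (List.pairwise_cons.mp hp).1 y (by simp)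
    have hp' : (y :: t).Pairwise (· ≤ ·) := (List.pairwise_cons.mp hp).2
    have hih : bcore d (y :: t) = consume d [y] y t := ih y hp'
    set n' : Int := ((y :: t).length : Int) with hn'
    set K : List Int := cutsB d (y :: t) ++ [n'] with hKdef
    have hK : ∀ a ∈ K, 0 ≤ a := by
      intro a ha
      rcases List.mem_append.mp ha with h | h
      · exact mem_cutsB_nonneg d (y :: t) a h
      · simp at h; subst h; positivity
    have hL0 : ∀ a ∈ (0 : Int) :: K, 0 ≤ a := by
      intro a ha
      rcases List.mem_cons.mp ha with rfl | h
      · norm_num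
      · exact hK a h
    have hcuts : cutsB d (x :: y :: t)
        = (if y - x > d then [(1 : Int)] else []) ++ (cutsB d (y :: t)).map (· + 1) := by
      rw [cutsB_eq, cutsN_cons, cutsB_eq]
      rw [List.map_append, List.map_map, List.map_map]
      have h1 : (if y - x > d then [(0 : Nat)] else []).map (fun k : Nat => (k : Int) + 1)
          = (if y - x > d then [(1 : Int)] else []) := by
        by_cases hgt : y - x > d <;> simp [hgt]
      rw [h1]
      congr 1
    have hlen : ((x :: y :: t).length : Int) = n' + 1 := by simp [hn']
    have hbcore_y : bcore d (y :: t)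
        = ((0 :: K).zip K).map (fun p => PySem.List.slice (y :: t) (some p.1) (some p.2)) := by
      rw [bcore, hKdef]
    by_cases hgt : y - x > d
    · -- gap: a new group starts at y
      have habs : ¬ |y - x| ≤ d := by
        have := le_abs_self (y - x); omega
      have hb : cutsB d (x :: y :: t) ++ [((x :: y :: t).length : Int)]
          = ((0 : Int) :: K).map (· + 1) := by
        rw [hcuts, if_pos hgt, hlen, hKdef]
        simp [List.map_append]
      rw [bcore, hb]
      have hz := zipslice_shift x (y :: t) (0 :: K) hL0
      rw [List.tail_cons] at hz
      rw [show ((0 : Int) :: K).map (· + 1) = 1 :: K.map (· + 1) by simp] at hz ⊢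
      rw [List.tail_cons] at hz
      rw [List.zip_cons_cons, List.map_cons, hz, ← hbcore_y, hih]
      rw [show PySem.List.slice (x :: y :: t) (some 0) (some 1) = [x] by
        rw [PySem.List.slice_toNat _ (by norm_num) (by norm_num)]; simp]
      simp [consume, habs]
    · -- no gap: y joins x's group
      have habs : |y - x| ≤ d := by rw [abs_of_nonneg (by omega)]; omega
      obtain ⟨c0, R, hKR⟩ := List.exists_cons_of_ne_nil (show K ≠ [] by rw [hKdef]; simp)
      have hc0 : 0 ≤ c0 := hK c0 (by rw [hKR]; simp)
      have hb : cutsB d (x :: y :: t) ++ [((x :: y :: t).length : Int)]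
          = K.map (· + 1) := by
        rw [hcuts, if_neg hgt, hlen, hKdef]
        simp [List.map_append]
      rw [bcore, hb]
      have hz := zipslice_shift x (y :: t) K hK
      rw [hKR] at hz ⊢
      rw [List.tail_cons] at hz
      rw [show ((c0 : Int) :: R).map (· + 1) = (c0 + 1) :: R.map (· + 1) by simp] at hz ⊢
      rw [List.tail_cons] at hz
      rw [List.zip_cons_cons, List.map_cons, hz]
      have hby : bcore d (y :: t)
          = PySem.List.slice (y :: t) (some 0) (some c0)
            :: ((c0 :: R).zip R).map (fun p => PySem.List.slice (y :: t) (some p.1) (some p.2)) := by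
        rw [hbcore_y, hKR, List.zip_cons_cons, List.map_cons]
      have h2 : PySem.List.slice (y :: t) (some 0) (some c0)
            :: ((c0 :: R).zip R).map (fun p => PySem.List.slice (y :: t) (some p.1) (some p.2))
          = consume d [y] y t := by rw [← hby, hih]
      have hcons : consume d [x] x (y :: t)
          = (x :: (consume d [y] y t).headI) :: (consume d [y] y t).tail := by
        show (if |y - x| ≤ d then consume d ([x] ++ [y]) y t else _) = _
        rw [if_pos habs, consume_append]
        rfl
      rw [hcons, ← h2]
      rw [slice_zero_succ _ _ _ hc0]
      rfl

lemma foldA_eq_consume (d : Int) : ∀ (xs : List Int) (gs : List (List Int)) (g : List Int) (p : Int), g.getLast? = some p →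
    List.foldl (aStep d) (gs ++ [g]) xs = gs ++ consume d g p xs := by
  intro xs
  induction xs with
  | nil => intro gs g p h; simp [consume]
  | cons i xs ih =>
    intro gs g p h
    have hstep : aStep d (gs ++ [g]) i =
        if |i - p| ≤ d then gs ++ [g ++ [i]] else (gs ++ [g]) ++ [[i]] := by
      simp [aStep, PySem.List.pyGet?_neg_one, h]
    simp only [List.foldl_cons, hstep, consume]
    by_cases hc : |i - p| ≤ d
    · simp only [if_pos hc]
      exact ih gs (g ++ [i]) i (by simp)
    · simp only [if_neg hc]
      rw [ih (gs ++ [g]) [i] i rfl]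
      simp

-- ===== VERDICT (by name: the statement is the Claim_ definition above) =====
theorem distance_group_spec : Claim_equal_distance_group := by
  intro il d _ hpre
  unfold Spec_distance_group
  have hsne : PySem.List.sorted il (fun x => x) false ≠ [] := by
    intro h
    apply hpre
    have hperm := PySem.List.sorted_perm il (fun x : Int => x) false
    rw [h] at hperm
    exact hperm.nil_eq.symm
  obtain ⟨x, xs, hs⟩ := List.exists_cons_of_ne_nil hsne
  have hpair : (x :: xs).Pairwise (· ≤ ·) := by
    have h := PySem.List.sorted_pairwise il (fun x : Int => x)
    rw [hs] at h
    exact h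
  have hA : distance_group il d = consume d [x] x xs := by
    unfold distance_group
    rw [hs]
    show List.foldl (aStep d) [[x]] xs = consume d [x] x xs
    rw [show ([[x]] : List (List Int)) = [] ++ [[x]] from rfl,
      foldA_eq_consume d xs [] [x] x rfl]
    simp
  have hB : distance_group_alt il d = bcore d (x :: xs) := by
    unfold distance_group_alt
    rw [hs]
    show (if ((x :: xs).length : Int) = 0 then [] else _) = _
    rw [if_neg (by simp only [List.length_cons]; push_cast; omega)]
    rfl
  rw [hA, hB, bcore_eq_consume d xs x hpair]
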